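-- pv_equiv track=rewrite | github.com/Cleveerty/WynnAppTest | DocuScope/core/filters.py | filter_for_melee
-- ===== SOURCE A (Python) =====
-- from typing import List, Dict, Any, Optional, Callable
--
-- def filter_for_melee(items: List[Dict[str, Any]]) -> List[Dict[str, Any]]:
--     """Filter items suitable for melee builds."""
--     scored_items = []
--
--     for item in items:
--         score = 0
--
--         # High value stats for melee
--         if item.get('mdPct', 0) > 0:
--             score += 3
--         if item.get('mdRaw', 0) > 0:
--             score += 2
--         if item.get('atkTier', 0) > 0:
--             score += 2
--         if item.get('str', 0) > 0:
--             score += 2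
--         if item.get('dex', 0) > 0:
--             score += 2
--
--         # Secondary useful stats
--         if item.get('ls', 0) > 0:
--             score += 1
--         if item.get('hp', 0) > 0:
--             score += 1
--
--         scored_items.append((item, score))
--
--     scored_items.sort(key=lambda x: x[1], reverse=True)
--     return [item for item, score in scored_items if score >= 0]
-- ===== SOURCE B (Python) =====
-- from typing import List, Dict, Any
--
-- def filter_for_melee(items: List[Dict[str, Any]]) -> List[Dict[str, Any]]:
--     """Filter items suitable for melee builds (bucket sort by bounded score)."""
--     buckets = [[] for _ in range(14)]
--     for item in items:
--         score = 0
--         if item.get('mdPct', 0) > 0: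
--             score += 3
--         if item.get('mdRaw', 0) > 0:
--             score += 2
--         if item.get('atkTier', 0) > 0:
--             score += 2
--         if item.get('str', 0) > 0:
--             score += 2
--         if item.get('dex', 0) > 0:
--             score += 2
--         if item.get('ls', 0) > 0:
--             score += 1
--         if item.get('hp', 0) > 0:
--             score += 1
--         buckets[score].append(item)
--     result = []
--     for s in range(13, -1, -1):
--         result += buckets[s]
--     return result
-- ===== Notes on version B (the rewrite author's own statement) =====
-- stated objective: alternative
-- what changed: Replaced build-pairs + stable descending sort + always-true filter with a single-pass counting/bucket sort: items are appended to one of 14 score buckets in input order and the buckets are concatenated from score 13 down to 0.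
import Mathlib
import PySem

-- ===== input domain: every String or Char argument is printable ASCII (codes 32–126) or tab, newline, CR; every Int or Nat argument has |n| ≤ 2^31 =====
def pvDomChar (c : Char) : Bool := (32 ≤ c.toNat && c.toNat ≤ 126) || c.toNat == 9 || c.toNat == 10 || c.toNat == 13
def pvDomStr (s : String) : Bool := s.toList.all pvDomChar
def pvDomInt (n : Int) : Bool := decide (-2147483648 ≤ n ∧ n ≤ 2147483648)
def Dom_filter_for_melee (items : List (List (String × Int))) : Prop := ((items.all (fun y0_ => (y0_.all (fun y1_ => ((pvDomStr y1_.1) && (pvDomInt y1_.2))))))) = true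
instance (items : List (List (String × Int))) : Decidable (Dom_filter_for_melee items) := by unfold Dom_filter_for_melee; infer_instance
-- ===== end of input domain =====

-- B replaces A's build-pairs + stable descending sort + always-true filter by a one-pass
-- bucket (counting) sort over the bounded score range 0..13 (an alternative algorithm).

-- item.get(k, 0) on an association-list dict: first matching key, default 0
def pyGet0 (item : List (String × Int)) (k : String) : Int := (item.lookup k).getD 0

-- the seven additive checks both Pythons perform verbatim
def meleeScore (item : List (String × Int)) : Int :=
  let s : Int := 0
  let s := if pyGet0 item "mdPct" > 0 then s + 3 else s
  let s := if pyGet0 item "mdRaw" > 0 then s + 2 else s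
  let s := if pyGet0 item "atkTier" > 0 then s + 2 else s
  let s := if pyGet0 item "str" > 0 then s + 2 else s
  let s := if pyGet0 item "dex" > 0 then s + 2 else s
  let s := if pyGet0 item "ls" > 0 then s + 1 else s
  let s := if pyGet0 item "hp" > 0 then s + 1 else s
  s

-- ===== PORT A =====
def filter_for_melee (items : List (List (String × Int))) : List (List (String × Int)) :=
  let scored := items.foldl (fun acc item => acc ++ [(item, meleeScore item)])
    ([] : List (List (String × Int) × Int))
  let sortedL := PySem.List.sorted scored (fun x => x.2) true
  (sortedL.filter (fun x => decide (x.2 ≥ 0))).map (fun x => x.1)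

-- ===== PORT B =====
def filter_for_melee_alt (items : List (List (String × Int))) : List (List (String × Int)) :=
  let buckets := items.foldl
    (fun bks item =>
      PySem.List.pySetD bks (meleeScore item) (PySem.List.pyGetD bks (meleeScore item) [] ++ [item]))
    (List.replicate 14 ([] : List (List (String × Int))))
  (PySem.List.pyRange 13 (-1) (-1)).foldl (fun out s => out ++ PySem.List.pyGetD buckets s []) []

-- ===== PRECONDITION & SPEC =====
def Spec_filter_for_melee (items : List (List (String × Int))) (out : List (List (String × Int))) : Prop := out = filter_for_melee_alt items
instance (items : List (List (String × Int))) (out : List (List (String × Int))) : Decidable (Spec_filter_for_melee items out) := by unfold Spec_filter_for_melee; infer_instance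

-- ===== CLAIM (what is proved, stated in full; the proofs are below) =====
def Claim_equal_filter_for_melee : Prop := ∀ (items : List (List (String × Int))), Dom_filter_for_melee items → Spec_filter_for_melee items (filter_for_melee items)

-- ===== LEMMAS AND PROOFS =====

-- buckets of the pair list, highest score first
def gatherP (xs : List (List (String × Int) × Int)) : Nat → List (List (String × Int) × Int)
  | 0 => []
  | n+1 => xs.filter (fun p => p.2 = (n : Int)) ++ gatherP xs n

-- buckets of the items themselves, highest score first
def gatherI (items : List (List (String × Int))) : Nat → List (List (String × Int))
  | 0 => []
  | n+1 => items.filter (fun it => meleeScore it = (n : Int)) ++ gatherI items n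

theorem meleeScore_bounds (item : List (String × Int)) :
    0 ≤ meleeScore item ∧ meleeScore item ≤ 13 := by
  simp only [meleeScore]
  split_ifs <;> omega

theorem gatherP_nil (n : Nat) : gatherP [] n = [] := by
  induction n with
  | zero => rfl
  | succ n ih => simp [gatherP, ih]

theorem mem_gatherP {p : List (String × Int) × Int} {xs : List (List (String × Int) × Int)}
    {n : Nat} (h : p ∈ gatherP xs n) : p ∈ xs ∧ p.2 < (n : Int) := by
  induction n with
  | zero => simp [gatherP] at h
  | succ n ih =>
    simp only [gatherP, List.mem_append, List.mem_filter, decide_eq_true_eq] at h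
    rcases h with ⟨hm, he⟩ | h
    · exact ⟨hm, by rw [he]; push_cast; omega⟩
    · obtain ⟨hm, hlt⟩ := ih h
      exact ⟨hm, by push_cast at hlt ⊢; omega⟩

theorem insertBy_of_forall_before {α : Type} (before : α → α → Bool) (x : α)
    (ys : List α) (h : ∀ y ∈ ys, before x y = true) :
    PySem.List.insertBy before x ys = x :: ys := by
  cases ys with
  | nil => rfl
  | cons y ys => simp [PySem.List.insertBy, h y (by simp)]

theorem insertBy_append_not_before {α : Type} (before : α → α → Bool) (x : α)
    (as bs : List α) (h : ∀ a ∈ as, before x a = false) :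
    PySem.List.insertBy before x (as ++ bs) = as ++ PySem.List.insertBy before x bs := by
  induction as with
  | nil => simp
  | cons a as ih =>
    have ha := h a (by simp)
    simp only [List.cons_append, PySem.List.insertBy, ha, Bool.false_eq_true, if_false]
    rw [ih (fun a ha => h a (by simp [ha]))]

theorem gatherP_append_high (xs : List (List (String × Int) × Int))
    (x : List (String × Int) × Int) (n : Nat) (h : (n : Int) ≤ x.2) :
    gatherP (xs ++ [x]) n = gatherP xs n := by
  induction n with
  | zero => rfl
  | succ n ih =>
    have hne : ¬ (x.2 = (n : Int)) := by push_cast at h ⊢; omega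
    simp only [gatherP, List.filter_append, List.filter_cons, List.filter_nil,
      decide_eq_true_eq, hne, if_false]
    rw [ih (by push_cast at h ⊢; omega)]
    simp

theorem insert_gather (xs : List (List (String × Int) × Int))
    (x : List (String × Int) × Int) (n : Nat) (hlo : 0 ≤ x.2) (hn : x.2 < (n : Int)) :
    PySem.List.insertBy (fun a b => decide (b.2 < a.2)) x (gatherP xs n)
      = gatherP (xs ++ [x]) n := by
  induction n with
  | zero => simp at hn; omega
  | succ n ih =>
    by_cases hx : x.2 = (n : Int)
    · -- x lands at the end of the top bucket
      rw [gatherP, insertBy_append_not_before _ _ _ _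
          (fun a ha => by
            have := (List.mem_filter.mp ha).2
            simp only [decide_eq_true_eq] at this
            simp only [decide_eq_false_iff_not, not_lt]
            omega),
        insertBy_of_forall_before _ _ _
          (fun y hy => by
            have := (mem_gatherP hy).2
            simp only [decide_eq_true_eq]
            omega)]
      rw [gatherP, List.filter_append, gatherP_append_high xs x n (by omega)]
      simp [hx]
    · -- x belongs to a lower bucket
      have hlt : x.2 < (n : Int) := by
        have := hn; push_cast at this ⊢; omega
      rw [gatherP, insertBy_append_not_before _ _ _ _
          (fun a ha => by
            have := (List.mem_filter.mp ha).2
            simp only [decide_eq_true_eq] at this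
            simp only [decide_eq_false_iff_not, not_lt]
            omega),
        ih hlt]
      rw [gatherP, List.filter_append]
      simp [hx]

theorem sorted_eq_gatherP (xs : List (List (String × Int) × Int))
    (h : ∀ p ∈ xs, 0 ≤ p.2 ∧ p.2 ≤ 13) :
    PySem.List.sorted xs (fun p => p.2) true = gatherP xs 14 := by
  induction xs using List.reverseRecOn with
  | nil => simp [PySem.List.sorted, gatherP_nil]
  | append_singleton xs x ih =>
    rw [PySem.List.sorted_rev_eq_foldl_insertBy, List.foldl_append,
      ← PySem.List.sorted_rev_eq_foldl_insertBy,
      ih (fun p hp => h p (by simp [hp]))]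
    simp only [List.foldl_cons, List.foldl_nil]
    have hx := h x (by simp)
    exact insert_gather xs x 14 hx.1 (by push_cast; omega)

-- A computes gatherI items 14
theorem portA_eq_gatherI (items : List (List (String × Int))) :
    filter_for_melee items = gatherI items 14 := by
  unfold filter_for_melee
  rw [PySem.List.foldl_append_singleton_eq_map (fun item => (item, meleeScore item)) items []]
  simp only [List.nil_append]
  rw [sorted_eq_gatherP _ (by
    intro p hp
    simp only [List.mem_map] at hp
    obtain ⟨it, _, rfl⟩ := hp
    exact meleeScore_bounds it)]
  rw [List.filter_eq_self.mpr (by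
    intro p hp
    have := (mem_gatherP hp).1
    simp only [List.mem_map] at this
    obtain ⟨it, _, rfl⟩ := this
    have := (meleeScore_bounds it).1
    simp only [ge_iff_le, decide_eq_true_eq]
    omega)]
  -- map fst over the bucketed pair list
  have : ∀ n : Nat, (gatherP (items.map (fun item => (item, meleeScore item))) n).map
      (fun x => x.1) = gatherI items n := by
    intro n
    induction n with
    | zero => rfl
    | succ n ih =>
      simp only [gatherP, gatherI, List.map_append, ih, List.filter_map,
        List.map_map, Function.comp_def, List.map_id']
  exact this 14

-- the bucket array after the first loop of B
def bucketsOf (items : List (List (String × Int))) : List (List (List (String × Int))) :=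
  items.foldl
    (fun bks item =>
      PySem.List.pySetD bks (meleeScore item) (PySem.List.pyGetD bks (meleeScore item) [] ++ [item]))
    (List.replicate 14 ([] : List (List (String × Int))))

theorem bucketsOf_spec (items : List (List (String × Int))) :
    (bucketsOf items).length = 14 ∧
      ∀ s : Int, 0 ≤ s → s < 14 →
        PySem.List.pyGetD (bucketsOf items) s []
          = items.filter (fun it => meleeScore it = s) := by
  induction items using List.reverseRecOn with
  | nil =>
    refine ⟨by simp [bucketsOf], ?_⟩
    intro s h0 h14
    show PySem.List.pyGetD (List.replicate 14 ([] : List (List (String × Int)))) s [] = []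
    rw [show s = ((s.toNat : Nat) : Int) from by omega, PySem.List.pyGetD_natCast]
    have hlt : s.toNat < (List.replicate 14 ([] : List (List (String × Int)))).length := by
      rw [List.length_replicate]; omega
    rw [List.getD_eq_getElem _ _ hlt, List.getElem_replicate]
  | append_singleton items x ih =>
    have hstep : bucketsOf (items ++ [x])
        = PySem.List.pySetD (bucketsOf items) (meleeScore x)
            (PySem.List.pyGetD (bucketsOf items) (meleeScore x) [] ++ [x]) := by
      unfold bucketsOf
      rw [List.foldl_append]
      rfl
    have hlen : (bucketsOf (items ++ [x])).length = 14 := by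
      rw [hstep, PySem.List.length_pySetD, ih.1]
    refine ⟨hlen, ?_⟩
    intro s h0 h14
    have hx := meleeScore_bounds x
    have hxn : meleeScore x = (((meleeScore x).toNat : Nat) : Int) := by omega
    have hsn : s = ((s.toNat : Nat) : Int) := by omega
    rw [hstep, hxn, hsn, PySem.List.pyGetD_pySetD_natCast _ _ _ _ _ (by rw [ih.1]; omega)]
    rw [List.filter_append]
    by_cases heq : s.toNat = (meleeScore x).toNat
    · have hval : meleeScore x = s := by omega
      simp only [heq, if_true]
      rw [← hxn, ih.2 (meleeScore x) hx.1 (by omega)]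
      simp
    · have hval : ¬ (meleeScore x = s) := by omega
      simp only [heq, if_false]
      rw [← hsn, ih.2 s h0 h14]
      simp [hval]

theorem portB_eq_gatherI (items : List (List (String × Int))) :
    filter_for_melee_alt items = gatherI items 14 := by
  have h := (bucketsOf_spec items).2
  show (PySem.List.pyRange 13 (-1) (-1)).foldl
      (fun out s => out ++ PySem.List.pyGetD (bucketsOf items) s []) [] = gatherI items 14
  rw [show PySem.List.pyRange 13 (-1) (-1)
      = [13, 12, 11, 10, 9, 8, 7, 6, 5, 4, 3, 2, 1, 0] from by decide]
  simp only [List.foldl_cons, List.foldl_nil, List.nil_append]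
  rw [h 13 (by norm_num) (by norm_num), h 12 (by norm_num) (by norm_num),
    h 11 (by norm_num) (by norm_num), h 10 (by norm_num) (by norm_num),
    h 9 (by norm_num) (by norm_num), h 8 (by norm_num) (by norm_num),
    h 7 (by norm_num) (by norm_num), h 6 (by norm_num) (by norm_num),
    h 5 (by norm_num) (by norm_num), h 4 (by norm_num) (by norm_num),
    h 3 (by norm_num) (by norm_num), h 2 (by norm_num) (by norm_num),
    h 1 (by norm_num) (by norm_num), h 0 (by norm_num) (by norm_num)]
  norm_num [gatherI, List.append_assoc]

-- ===== VERDICT (by name: the statement is the Claim_ definition above) =====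
theorem filter_for_melee_spec : Claim_equal_filter_for_melee := by
  intro items _
  unfold Spec_filter_for_melee
  rw [portA_eq_gatherI, portB_eq_gatherI]
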